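-- pv_equiv track=rewrite | github.com/hiimnhan/advent-of-code | solutions/utils/grid.py | find_turning_points
-- ===== SOURCE A (Python) =====
-- def find_turning_points(path):
--     if len(path) < 3:
--         return []
--     turning_points = []
--     for i in range(1, len(path) - 1):
--         prev = path[i - 1]
--         curr = path[i]
--         next = path[i + 1]
--         # Check if direction changes
--         if (curr[0] - prev[0], curr[1] - prev[1]) != (
--             next[0] - curr[0],
--             next[1] - curr[1],
--         ):
--             turning_points.append(curr)
--     return turning_points
-- ===== SOURCE B (Python) =====
-- def find_turning_points(path):
--     # Recursive decomposition: recurse down the path with a sliding (prev, curr)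
--     # window, prepending curr whenever the incoming and outgoing steps differ.
--     if len(path) < 3:
--         return []
--
--     def rec(prev, curr, rest):
--         if not rest:
--             return []
--         nxt = rest[0]
--         tail = rec(curr, nxt, rest[1:])
--         if (curr[0] - prev[0], curr[1] - prev[1]) != (nxt[0] - curr[0], nxt[1] - curr[1]):
--             return [curr] + tail
--         return tail
--
--     return rec(path[0], path[1], path[2:])
-- ===== Notes on version B (the rewrite author's own statement) =====
-- stated objective: alternative
-- what changed: replaces A's index loop over range(1, len-1) with path[i-1]/path[i]/path[i+1] lookups and an append accumulator by structural recursion carrying a sliding (prev, curr) window down the list and prepending turning points on the way back up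
import Mathlib
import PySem

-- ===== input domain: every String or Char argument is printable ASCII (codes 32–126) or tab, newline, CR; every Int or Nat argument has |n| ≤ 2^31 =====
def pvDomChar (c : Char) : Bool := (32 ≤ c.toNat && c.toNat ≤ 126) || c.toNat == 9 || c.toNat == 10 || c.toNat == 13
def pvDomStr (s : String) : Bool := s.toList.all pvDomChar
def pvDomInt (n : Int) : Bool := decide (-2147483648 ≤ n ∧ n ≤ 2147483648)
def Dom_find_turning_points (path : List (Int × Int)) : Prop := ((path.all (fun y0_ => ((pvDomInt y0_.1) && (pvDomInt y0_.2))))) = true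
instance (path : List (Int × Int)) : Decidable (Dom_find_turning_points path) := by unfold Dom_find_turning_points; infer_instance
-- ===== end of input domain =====

-- B replaces A's index loop (range + path[i-1]/path[i]/path[i+1] + append accumulator) by
-- structural recursion with a sliding (prev, curr) window, prepending on the way back up.

-- ===== PORT A =====
-- loop body of A's for-loop, named so the proofs can refer to it
def pvStep (path : List (Int × Int)) (acc : List (Int × Int)) (i : Int) : List (Int × Int) :=
  let prev := PySem.List.pyGetD path (i - 1) (0, 0)
  let curr := PySem.List.pyGetD path i (0, 0)
  let next := PySem.List.pyGetD path (i + 1) (0, 0)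
  if (curr.1 - prev.1, curr.2 - prev.2) ≠ (next.1 - curr.1, next.2 - curr.2)
  then acc ++ [curr] else acc

def find_turning_points (path : List (Int × Int)) : List (Int × Int) :=
  if path.length < 3 then []
  else (PySem.List.pyRange 1 ((path.length : Int) - 1) 1).foldl (pvStep path) []

-- ===== PORT B =====
-- Source B's inner function rec(prev, curr, rest)
def pvRec (prev curr : Int × Int) : List (Int × Int) → List (Int × Int)
  | [] => []
  | nxt :: rest =>
    let tail := pvRec curr nxt rest
    if (curr.1 - prev.1, curr.2 - prev.2) ≠ (nxt.1 - curr.1, nxt.2 - curr.2)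
    then curr :: tail else tail

def find_turning_points_alt (path : List (Int × Int)) : List (Int × Int) :=
  if path.length < 3 then []
  else match path with
    -- path[0], path[1], path[2:] (the catch-all is unreachable: length ≥ 3)
    | a :: b :: rest => pvRec a b rest
    | _ => []

-- ===== PRECONDITION & SPEC =====
def Spec_find_turning_points (path : List (Int × Int)) (out : List (Int × Int)) : Prop := out = find_turning_points_alt path
instance (path : List (Int × Int)) (out : List (Int × Int)) : Decidable (Spec_find_turning_points path out) := by unfold Spec_find_turning_points; infer_instance

-- ===== CLAIM (what is proved, stated in full; the proofs are below) =====
def Claim_equal_find_turning_points : Prop := ∀ (path : List (Int × Int)), Dom_find_turning_points path → Spec_find_turning_points path (find_turning_points path)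

-- ===== LEMMAS AND PROOFS =====

lemma pyGetD_cons_succ (x : Int × Int) (path : List (Int × Int)) (j : Int) (hj : 0 ≤ j)
    (d : Int × Int) : PySem.List.pyGetD (x :: path) (j + 1) d = PySem.List.pyGetD path j d := by
  obtain ⟨m, rfl⟩ := Int.eq_ofNat_of_zero_le hj
  have h : ((m : Int) + 1) = ((m + 1 : Nat) : Int) := by push_cast; ring
  rw [h, PySem.List.pyGetD_natCast, PySem.List.pyGetD_natCast, List.getD_cons_succ]

lemma pyRange_succ_shift (a b : Int) :
    PySem.List.pyRange (a + 1) (b + 1) 1 = (PySem.List.pyRange a b 1).map (· + 1) := by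
  rw [PySem.List.pyRange_one, PySem.List.pyRange_one]
  have h : b + 1 - (a + 1) = b - a := by ring
  rw [h, List.map_map]
  exact List.map_congr_left (fun k _ => by simp; ring)

lemma foldl_step_shift (x : Int × Int) (path : List (Int × Int)) :
    ∀ (lo hi : Int), 1 ≤ lo → ∀ (acc : List (Int × Int)),
    (PySem.List.pyRange (lo + 1) (hi + 1) 1).foldl (pvStep (x :: path)) acc
      = (PySem.List.pyRange lo hi 1).foldl (pvStep path) acc := by
  intro lo hi hlo acc
  rw [pyRange_succ_shift, List.foldl_map]
  refine PySem.List.foldl_congr_mem _ _ _ _ (fun a i hi => ?_)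
  have h1 : 1 ≤ i := (PySem.List.mem_pyRange_one.mp hi).1.trans' hlo
  unfold pvStep
  have e1 : i + 1 - 1 = (i - 1) + 1 := by ring
  have e2 : i + 1 + 1 = (i + 1) + 1 := by ring
  rw [e1, e2, pyGetD_cons_succ _ _ _ (by omega), pyGetD_cons_succ _ _ _ (by omega),
    pyGetD_cons_succ _ _ _ (by omega)]

lemma foldl_eq_rec : ∀ (l : List (Int × Int)) (a b : Int × Int) (acc : List (Int × Int)),
    (PySem.List.pyRange 1 ((l.length : Int) + 1) 1).foldl (pvStep (a :: b :: l)) acc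
      = acc ++ pvRec a b l := by
  intro l
  induction l with
  | nil =>
    intro a b acc
    simp [PySem.List.pyRange_one_eq_nil, pvRec]
  | cons c t ih =>
    intro a b acc
    have hlen : ((c :: t).length : Int) + 1 = ((t.length : Int) + 1) + 1 := by
      simp only [List.length_cons]; push_cast; ring
    rw [hlen, PySem.List.pyRange_one_cons (by omega), List.foldl_cons]
    have g0 : PySem.List.pyGetD (a :: b :: c :: t) (1 - 1) (0, 0) = a := by
      norm_num [PySem.List.pyGetD_zero_cons]
    have g1 : PySem.List.pyGetD (a :: b :: c :: t) 1 (0, 0) = b := by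
      have e : (1 : Int) = ((1 : Nat) : Int) := by norm_num
      rw [e, PySem.List.pyGetD_natCast]; rfl
    have g2 : PySem.List.pyGetD (a :: b :: c :: t) (1 + 1) (0, 0) = c := by
      have e : (1 : Int) + 1 = ((2 : Nat) : Int) := by norm_num
      rw [e, PySem.List.pyGetD_natCast]; rfl
    have hstep : pvStep (a :: b :: c :: t) acc 1
        = acc ++ (if (b.1 - a.1, b.2 - a.2) ≠ (c.1 - b.1, c.2 - b.2) then [b] else []) := by
      unfold pvStep
      rw [g0, g1, g2]
      split_ifs <;> simp_all [Prod.ext_iff]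
    rw [hstep, foldl_step_shift a (b :: c :: t) 1 ((t.length : Int) + 1) le_rfl, ih b c,
      show pvRec a b (c :: t)
          = (if (b.1 - a.1, b.2 - a.2) ≠ (c.1 - b.1, c.2 - b.2)
             then b :: pvRec b c t else pvRec b c t) from rfl]
    split_ifs <;> simp [List.append_assoc]

-- ===== VERDICT (by name: the statement is the Claim_ definition above) =====
theorem find_turning_points_spec : Claim_equal_find_turning_points := by
  intro path _
  unfold Spec_find_turning_points find_turning_points find_turning_points_alt
  match path with
  | [] => simp
  | [a] => simp
  | [a, b] => simp
  | a :: b :: c :: t =>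
    have hlen : ¬ (a :: b :: c :: t).length < 3 := by simp
    rw [if_neg hlen, if_neg hlen]
    have he : (((a :: b :: c :: t).length : Int)) - 1 = (((c :: t).length : Int)) + 1 := by
      simp only [List.length_cons]; push_cast; ring
    rw [he, foldl_eq_rec (c :: t) a b [], List.nil_append]
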